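-- pv_equiv track=rewrite | github.com/TAEKnical/Baekjoon-solution | 1316.py | count_string
-- ===== SOURCE A (Python) =====
-- def count_string(S):
--     count = 0
--     for i in S:
--         if len(i) <= 1:
--             count+=1
--             continue
--         else:
--             for j in range(len(i)-1):
--                 if i[j] != i[j+1]:
--                     if i[j] in i[j+1:]:
--                         tf=False
--                         break
--                     else:
--                         tf=True
--                         continue
--                 else:
--                     tf=True
--                     continue
--             if(tf==True):
--                 count+=1
--     return count
-- ===== SOURCE B (Python) =====
-- def count_string(S):
--     count = 0
--     for w in S:
--         reps = []
--         for ch in w: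
--             if not reps or ch != reps[-1]:
--                 reps.append(ch)
--         if len(set(reps)) == len(reps):
--             count += 1
--     return count
-- ===== Notes on version B (the rewrite author's own statement) =====
-- stated objective: idiomatic
-- what changed: B collapses each word's consecutive duplicate runs into a representative sequence in one pass and declares the word a group-word iff that sequence has no repeated character (len(set(reps)) == len(reps)), instead of A's per-boundary rescan of the word's tail ('i[j] in i[j+1:]') at every change of character.
import Mathlib
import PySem

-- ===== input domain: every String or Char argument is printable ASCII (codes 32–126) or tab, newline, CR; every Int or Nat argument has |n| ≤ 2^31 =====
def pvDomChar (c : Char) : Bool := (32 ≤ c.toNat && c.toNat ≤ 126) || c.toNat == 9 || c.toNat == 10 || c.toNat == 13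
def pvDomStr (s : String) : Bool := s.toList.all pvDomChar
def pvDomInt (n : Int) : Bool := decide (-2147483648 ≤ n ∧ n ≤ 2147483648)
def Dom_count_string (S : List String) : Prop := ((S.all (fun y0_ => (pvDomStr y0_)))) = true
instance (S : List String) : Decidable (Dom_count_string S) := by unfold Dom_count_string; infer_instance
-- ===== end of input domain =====

-- B replaces A's per-boundary tail rescan by collapsing consecutive duplicate runs and
-- checking the representative sequence for repeated characters (idiomatic, one linear pass per word).

-- ===== PORT A =====
-- inner 'for j in range(len(i)-1)' with its break/continue and the tf flag
def pvLoopA (cs : List Char) : List Int → Bool → Bool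
  | [], tf => tf
  | j :: rest, _ =>
    if PySem.List.pyGetD cs j ' ' ≠ PySem.List.pyGetD cs (j + 1) ' ' then
      -- 'i[j] in i[j+1:]' : substring test of the 1-char string i[j] in the slice
      if PySem.Chars.isIn [PySem.List.pyGetD cs j ' '] (PySem.List.slice cs (some (j + 1)) none) then
        false                       -- tf = False; break
      else pvLoopA cs rest true     -- tf = True; continue
    else pvLoopA cs rest true       -- tf = True; continue

def count_string (S : List String) : Int :=
  S.foldl (fun count i =>
    if PySem.Str.len i ≤ 1 then count + 1
    else if pvLoopA i.toList (PySem.List.pyRange 0 (PySem.Str.len i - 1) 1) true then count + 1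
    else count) 0

-- ===== PORT B =====
-- 'for ch in w: if not reps or ch != reps[-1]: reps.append(ch)'
def pvReps (cs : List Char) : List Char :=
  cs.foldl (fun reps ch =>
    match reps.getLast? with
    | none => reps ++ [ch]                                 -- 'not reps' : empty, append
    | some l => if ch ≠ l then reps ++ [ch] else reps) []  -- ch != reps[-1]

def count_string_alt (S : List String) : Int :=
  S.foldl (fun count w =>
    let reps := pvReps w.toList
    if PySem.Set.len (PySem.Set.ofList reps) = (reps.length : Int) then count + 1
    else count) 0

-- ===== PRECONDITION & SPEC =====
def Spec_count_string (S : List String) (out : Int) : Prop := out = count_string_alt S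
instance (S : List String) (out : Int) : Decidable (Spec_count_string S out) := by unfold Spec_count_string; infer_instance

-- ===== CLAIM (what is proved, stated in full; the proofs are below) =====
def Claim_equal_count_string : Prop := ∀ (S : List String), Dom_count_string S → Spec_count_string S (count_string S)

-- ===== LEMMAS AND PROOFS =====

-- run-compression of a word, recursively (proof-side characterisation of pvReps)
def pvCrec' (l : Char) : List Char → List Char
  | [] => []
  | a :: t => if a = l then pvCrec' l t else a :: pvCrec' a t

def pvCrec : List Char → List Char
  | [] => []
  | [a] => [a]
  | a :: b :: t => if a = b then pvCrec (b :: t) else a :: pvCrec (b :: t)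

-- proof-side characterisation of A's inner loop
def pvAux : List Char → Bool
  | [] => true
  | [_] => true
  | a :: b :: t => if a ≠ b then (if a ∈ b :: t then false else pvAux (b :: t)) else pvAux (b :: t)

theorem pvCrec_cons : ∀ (t : List Char) (a : Char), pvCrec (a :: t) = a :: pvCrec' a t
  | [], a => by simp [pvCrec, pvCrec']
  | b :: t', a => by
    by_cases h : a = b
    · subst h
      simp [pvCrec, pvCrec', pvCrec_cons t' a]
    · simp [pvCrec, pvCrec', h, Ne.symm h, pvCrec_cons t' b]

theorem pvReps_go : ∀ (cs acc : List Char) (l : Char), acc.getLast? = some l →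
    cs.foldl (fun reps ch =>
      match reps.getLast? with
      | none => reps ++ [ch]
      | some l => if ch ≠ l then reps ++ [ch] else reps) acc = acc ++ pvCrec' l cs
  | [], acc, l, h => by simp [pvCrec']
  | c :: t, acc, l, h => by
    by_cases hc : c = l
    · subst hc
      simp only [List.foldl_cons, h]
      rw [if_neg (by simp)]
      rw [pvReps_go t acc c h]
      simp [pvCrec']
    · simp only [List.foldl_cons, h, if_pos hc]
      rw [pvReps_go t (acc ++ [c]) c (by simp)]
      simp [pvCrec', hc]

theorem pvReps_eq_pvCrec : ∀ cs : List Char, pvReps cs = pvCrec cs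
  | [] => by simp [pvReps, pvCrec]
  | a :: t => by
    unfold pvReps
    simp only [List.foldl_cons, List.getLast?_nil, List.nil_append]
    rw [pvReps_go t [a] a (by simp), pvCrec_cons]
    simp

theorem mem_pvCrec : ∀ (cs : List Char) (x : Char), x ∈ pvCrec cs ↔ x ∈ cs
  | [], x => by simp [pvCrec]
  | [a], x => by simp [pvCrec]
  | a :: b :: t, x => by
    by_cases h : a = b
    · subst h
      simp [pvCrec, mem_pvCrec (a :: t) x, List.mem_cons]
    · simp [pvCrec, h, mem_pvCrec (b :: t) x]

theorem pvAux_eq_nodup : ∀ cs : List Char, pvAux cs = decide (pvCrec cs).Nodup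
  | [] => by simp [pvAux, pvCrec]
  | [a] => by simp [pvAux, pvCrec]
  | a :: b :: t => by
    by_cases h : a = b
    · subst h
      simpa [pvAux, pvCrec] using pvAux_eq_nodup (a :: t)
    · by_cases hm : a ∈ b :: t
      · have : a ∈ pvCrec (b :: t) := (mem_pvCrec _ _).mpr hm
        simp [pvAux, pvCrec, h, hm, List.nodup_cons, this]
      · have : a ∉ pvCrec (b :: t) := fun hc => hm ((mem_pvCrec _ _).mp hc)
        simp [pvAux, pvCrec, h, hm, List.nodup_cons, this, pvAux_eq_nodup (b :: t)]

theorem pvIsIn_singleton (c : Char) (l : List Char) :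
    PySem.Chars.isIn [c] l = decide (c ∈ l) := by
  by_cases h : c ∈ l
  · have : [c] <:+: l := by
      rcases List.append_of_mem h with ⟨s, t, rfl⟩
      exact ⟨s, t, by simp⟩
    simp [h, (PySem.Chars.isIn_iff_infix _ _).mpr this]
  · have : ¬ [c] <:+: l := fun hi => h (hi.sublist.subset (by simp))
    simp [h, (PySem.Chars.isIn_eq_false_iff _ _).mpr this]

theorem pvLoopA_bridge : ∀ (tail pre : List Char),
    pvLoopA (pre ++ tail)
      (PySem.List.pyRange (pre.length : Int) ((pre.length : Int) + tail.length - 1) 1) true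
      = pvAux tail
  | [], pre => by
    rw [PySem.List.pyRange_one_eq_nil (by simp)]
    simp [pvLoopA, pvAux]
  | [a], pre => by
    rw [PySem.List.pyRange_one_eq_nil (by simp)]
    simp [pvLoopA, pvAux]
  | a :: b :: t, pre => by
    have hlt : (pre.length : Int) < (pre.length : Int) + (a :: b :: t).length - 1 := by
      simp; omega
    rw [PySem.List.pyRange_one_cons hlt]
    have hga : PySem.List.pyGetD (pre ++ a :: b :: t) (pre.length : Int) ' ' = a := by
      rw [PySem.List.pyGetD_eq_getElem]
      · simp [List.getElem_append_right]
      · omega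
      · simp only [List.length_append, List.length_cons]; omega
    have hgb : PySem.List.pyGetD (pre ++ a :: b :: t) ((pre.length : Int) + 1) ' ' = b := by
      rw [PySem.List.pyGetD_eq_getElem]
      · have h1 : ((pre.length : Int) + 1).toNat = pre.length + 1 := by omega
        simp only [h1]
        rw [List.getElem_append_right (by omega)]
        simp
      · omega
      · simp only [List.length_append, List.length_cons]; omega
    have hslice : PySem.List.slice (pre ++ a :: b :: t) (some ((pre.length : Int) + 1)) none
        = b :: t := by
      have : ((pre.length : Int) + 1) = (((pre ++ [a]).length : Nat) : Int) := by simp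
      rw [this, PySem.List.slice_from_natCast]
      have hassoc : pre ++ a :: b :: t = (pre ++ [a]) ++ b :: t := by simp
      rw [hassoc, List.drop_left]
    have hrec := pvLoopA_bridge (b :: t) (pre ++ [a])
    have hlen : (((pre ++ [a]).length : Nat) : Int) = (pre.length : Int) + 1 := by simp
    have hbound : (pre.length : Int) + 1 + ((b :: t).length : Int) - 1
        = (pre.length : Int) + ((a :: b :: t).length : Int) - 1 := by simp; ring
    rw [hlen, hbound, (by simp : (pre ++ [a]) ++ b :: t = pre ++ a :: b :: t)] at hrec
    by_cases h : a = b
    · subst h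
      simp only [pvLoopA, hga, hgb]
      rw [if_neg (by simp)]
      rw [hrec]
      simp [pvAux]
    · by_cases hm : a ∈ b :: t
      · simp only [pvLoopA, hga, hgb]
        rw [if_pos h, hslice, pvIsIn_singleton]
        rw [if_pos (by simpa using hm)]
        simp [pvAux, h, hm]
      · simp only [pvLoopA, hga, hgb]
        rw [if_pos h, hslice, pvIsIn_singleton]
        rw [if_neg (by simpa using hm)]
        rw [hrec]
        simp [pvAux, h, hm]

theorem pvSetLen_iff (xs : List Char) :
    (PySem.Set.len (PySem.Set.ofList xs) = (xs.length : Int)) ↔ xs.Nodup := by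
  constructor
  · intro h
    have hperm : (PySem.Set.ofList xs).Perm xs.dedup := by
      rw [List.perm_ext_iff_of_nodup (PySem.Set.nodup_ofList xs) xs.nodup_dedup]
      intro x
      simp [PySem.Set.mem_ofList, List.mem_dedup]
    have hlen : (PySem.Set.ofList xs).length = xs.length := by
      simpa [PySem.Set.len] using h
    have : xs.dedup.length = xs.length := by rw [← hperm.length_eq, hlen]
    have := xs.dedup_sublist.eq_of_length this
    exact List.dedup_eq_self.mp this
  · intro h
    rw [PySem.Set.ofList_eq_self_of_nodup xs h]
    simp [PySem.Set.len]

theorem pvWord_eq (count : Int) (w : String) :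
    (if PySem.Str.len w ≤ 1 then count + 1
     else if pvLoopA w.toList (PySem.List.pyRange 0 (PySem.Str.len w - 1) 1) true then count + 1
     else count)
    = (if PySem.Set.len (PySem.Set.ofList (pvReps w.toList)) = ((pvReps w.toList).length : Int)
       then count + 1 else count) := by
  have hlen : PySem.Str.len w = (w.toList.length : Int) := by simp [PySem.Str.len_eq]
  match hcs : w.toList with
  | [] => simp [hcs, pvReps_eq_pvCrec, pvCrec, PySem.Set.len, PySem.Set.ofList]
  | [a] => simp [hcs, pvReps_eq_pvCrec, pvCrec, PySem.Set.len, PySem.Set.ofList,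
      PySem.Set.add, PySem.Set.empty, PySem.Set.contains]
  | a :: b :: t =>
    have hL : w.toList.length = t.length + 2 := by rw [hcs]; simp
    have hgt : ¬ PySem.Str.len w ≤ 1 := by
      rw [hlen, hL]
      push_cast
      omega
    have hbridge := pvLoopA_bridge (a :: b :: t) []
    simp only [List.nil_append, List.length_nil, Nat.cast_zero, Int.zero_add] at hbridge
    have hzero : (0 : Int) + ((a :: b :: t).length : Int) - 1
        = (w.toList.length : Int) - 1 := by rw [hcs]; ring
    rw [if_neg hgt, hlen, hcs]
    have : pvLoopA (a :: b :: t)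
        (PySem.List.pyRange 0 (((a :: b :: t).length : Int) - 1) 1) true
        = pvAux (a :: b :: t) := by
      simpa using hbridge
    rw [this, pvAux_eq_nodup, pvReps_eq_pvCrec (a :: b :: t)]
    by_cases hnd : (pvCrec (a :: b :: t)).Nodup
    · rw [if_pos (by simpa using hnd), if_pos ((pvSetLen_iff _).mpr hnd)]
    · rw [if_neg (by simpa using hnd), if_neg (fun hc => hnd ((pvSetLen_iff _).mp hc))]

-- ===== VERDICT (by name: the statement is the Claim_ definition above) =====
theorem count_string_spec : Claim_equal_count_string := by
  intro S _
  unfold Spec_count_string count_string count_string_alt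
  apply List.foldl_ext
  intro count w _
  exact pvWord_eq count w
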